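-- pv_equiv track=rewrite | github.com/mithrantir/CodinGame | practice/puzzles/medium/Anagrams.py | reverse_phase_2
-- ===== SOURCE A (Python) =====
-- alpha = "ABCDEFGHIJKLMNOPQRSTUVWXYZ"
--
-- def reverse_phase_2(phrase):
--     phrase_list, hold_let, hold_ind = [c for c in phrase], [], []
--     for i in range(len(phrase_list)):
--         if phrase_list[i].isalpha() and alpha.index(phrase_list[i]) % 3 == 2:
--             hold_ind.append(i)
--             hold_let.append(phrase_list[i])
--
--     if len(hold_let) > 1:
--         hold_let_shift = hold_let[1:len(hold_let)] + [hold_let[0]]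
--         for i in range(len(hold_ind)):
--             phrase_list[hold_ind[i]] = hold_let_shift[i]
--     return "".join(c for c in phrase_list)
-- ===== SOURCE B (Python) =====
-- alpha = "ABCDEFGHIJKLMNOPQRSTUVWXYZ"
--
-- def reverse_phase_2(phrase):
--     # One pass with a 'previous selected index' instead of collect/shift/write-back.
--     result = list(phrase)
--     prev = None
--     first_letter = None
--     for i, c in enumerate(result):
--         if c.isalpha() and alpha.index(c) % 3 == 2:
--             if prev is None:
--                 first_letter = c
--             else:
--                 result[prev] = c
--             prev = i
--     if prev is not None:
--         result[prev] = first_letter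
--     return "".join(result)
-- ===== Notes on version B (the rewrite author's own statement) =====
-- stated objective: alternative
-- what changed: Replaces A's three phases (collect indices+letters, build a shifted copy of the letter list, write back by index) with a single pass that carries only the previous selected index and the first selected letter, writing each selected letter into the previous selected slot and closing the cycle after the loop.
import Mathlib
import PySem

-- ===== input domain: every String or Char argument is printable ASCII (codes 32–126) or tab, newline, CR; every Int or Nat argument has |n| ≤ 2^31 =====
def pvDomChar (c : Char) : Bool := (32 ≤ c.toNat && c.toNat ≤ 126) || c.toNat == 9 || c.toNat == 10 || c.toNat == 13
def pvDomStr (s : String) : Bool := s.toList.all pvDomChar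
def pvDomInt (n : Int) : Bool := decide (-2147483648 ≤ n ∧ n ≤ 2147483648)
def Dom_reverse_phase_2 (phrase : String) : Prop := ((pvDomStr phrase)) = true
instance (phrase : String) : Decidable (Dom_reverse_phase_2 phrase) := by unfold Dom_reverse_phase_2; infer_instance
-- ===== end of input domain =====

-- B re-decomposes A's collect/shift/write-back into a single pass carrying the previous
-- selected index and the first selected letter; same return value on Pre_ (alternative, not faster).

-- alpha = "ABCDEFGHIJKLMNOPQRSTUVWXYZ"  (module constant shared by both sources)
def pvAlpha : List Char := "ABCDEFGHIJKLMNOPQRSTUVWXYZ".toList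

-- the shared test `c.isalpha() and alpha.index(c) % 3 == 2`; on `none` Python's
-- alpha.index raises ValueError — those inputs are excluded by Pre_reverse_phase_2.
def pvSel (c : Char) : Bool :=
  PySem.Chars.isalpha c &&
    (match PySem.List.index? pvAlpha c with
     | some k => k % 3 == 2
     | none => false)

-- ===== PORT A =====
def reverse_phase_2 (phrase : String) : String :=
  let phrase_list := phrase.toList
  -- for i in range(len(phrase_list)): if selected: append i / letter
  let hl := (List.range phrase_list.length).foldl
      (fun (s : List Nat × List Char) i =>
        if pvSel (phrase_list.getD i ' ') then (s.1 ++ [i], s.2 ++ [phrase_list.getD i ' '])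
        else s)
      ([], [])
  let hold_ind := hl.1
  let hold_let := hl.2
  if hold_let.length > 1 then
    let hold_let_shift := hold_let.drop 1 ++ [hold_let.getD 0 ' ']
    let phrase_list' := (List.range hold_ind.length).foldl
        (fun (l : List Char) i => l.set (hold_ind.getD i 0) (hold_let_shift.getD i ' '))
        phrase_list
    String.mk phrase_list'
  else String.mk phrase_list

-- ===== PORT B =====
-- the one-pass loop of Source B: `for i, c in enumerate(result): ...` (writes happen only at
-- indices < i, so reading the original suffix is exactly what the Python reads)
def pvAltLoop (res : List Char) (i : Nat) (pending : List Char)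
    (prev : Option Nat) (first : Option Char) : List Char × Option Nat × Option Char :=
  match pending with
  | [] => (res, prev, first)
  | c :: rest =>
    if pvSel c then
      match prev with
      | none => pvAltLoop res (i+1) rest (some i) (some c)
      | some p => pvAltLoop (res.set p c) (i+1) rest (some i) first
    else pvAltLoop res (i+1) rest prev first

def reverse_phase_2_alt (phrase : String) : String :=
  let result := phrase.toList
  match pvAltLoop result 0 result none none with
  | (r, some p, some f) => String.mk (r.set p f)
  | (r, some _, none) => String.mk r   -- unreachable: first is set whenever prev is
  | (r, none, _) => String.mk r

-- ===== PRECONDITION & SPEC =====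
-- Pre_ excludes phrases containing a lowercase letter: there `alpha.index` raises
-- ValueError in A (and in B alike), so A returns no value.
def Pre_reverse_phase_2 (phrase : String) : Prop :=
  (phrase.toList.all (fun c => !PySem.Chars.islower c)) = true

instance (phrase : String) : Decidable (Pre_reverse_phase_2 phrase) := by
  unfold Pre_reverse_phase_2; infer_instance

def pvWitness_reverse_phase_2 : String := "ABC IF!"

def Spec_reverse_phase_2 (phrase : String) (out : String) : Prop := out = reverse_phase_2_alt phrase
instance (phrase : String) (out : String) : Decidable (Spec_reverse_phase_2 phrase out) := by unfold Spec_reverse_phase_2; infer_instance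

-- ===== CLAIM (what is proved, stated in full; the proofs are below) =====
def Claim_equal_reverse_phase_2 : Prop := ∀ (phrase : String), Dom_reverse_phase_2 phrase → Pre_reverse_phase_2 phrase → Spec_reverse_phase_2 phrase (reverse_phase_2 phrase)

-- ===== LEMMAS AND PROOFS =====

-- the (index, letter) pairs of the selected positions of a list, starting at offset i
def selPairs : List Char → Nat → List (Nat × Char)
  | [], _ => []
  | c :: rest, i => if pvSel c then (i, c) :: selPairs rest (i+1) else selPairs rest (i+1)

-- the chain of writes B performs while scanning, given the previous selected index p:
-- returns (interior writes, last selected index)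
def chainWrites (p : Nat) : List (Nat × Char) → List (Nat × Char) × Nat
  | [] => ([], p)
  | (q, c) :: rest => let r := chainWrites q rest; ((p, c) :: r.1, r.2)

def applyW (l : List Char) (ws : List (Nat × Char)) : List Char :=
  ws.foldl (fun r w => r.set w.1 w.2) l

lemma selPairs_get : ∀ (t : List Char) (i q : Nat) (c : Char),
    (q, c) ∈ selPairs t i → ∃ j, q = i + j ∧ t[j]? = some c := by
  intro t
  induction t with
  | nil => intro i q c h; simp [selPairs] at h
  | cons a rest ih =>
    intro i q c h
    simp only [selPairs] at h
    by_cases hs : pvSel a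
    · simp [hs] at h
      rcases h with ⟨hq, hc⟩ | h
      · exact ⟨0, by simpa [hq], by simp [hc]⟩
      · rcases ih (i+1) q c h with ⟨j, hj, hg⟩
        exact ⟨j+1, by omega, by simpa using hg⟩
    · simp [hs] at h
      rcases ih (i+1) q c h with ⟨j, hj, hg⟩
      exact ⟨j+1, by omega, by simpa using hg⟩

lemma foldA_gen (l : List Char) : ∀ (t : List Char) (i : Nat) (acc : List Nat × List Char),
    l.drop i = t →
    (List.range' i t.length).foldl
      (fun (s : List Nat × List Char) j =>
        if pvSel (l.getD j ' ') then (s.1 ++ [j], s.2 ++ [l.getD j ' ']) else s) acc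
    = (acc.1 ++ (selPairs t i).map Prod.fst, acc.2 ++ (selPairs t i).map Prod.snd) := by
  intro t
  induction t with
  | nil => intro i acc _; simp [selPairs]
  | cons c rest ih =>
    intro i acc hd
    have hget : l.getD i ' ' = c := by
      have hgi : l[i]? = some c := by
        have h0 : (List.drop i l)[0]? = l[i]? := by
          simpa using (List.getElem?_drop (l := l) (i := i) (j := 0))
        rw [hd] at h0; simpa using h0.symm
      simp [List.getD, hgi]
    have hd' : l.drop (i+1) = rest := by
      have : l.drop (i+1) = (l.drop i).drop 1 := by
        rw [List.drop_drop]
      rw [this, hd]; rfl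
    rw [List.length_cons, List.range'_succ, List.foldl_cons, hget]
    by_cases hs : pvSel c
    · rw [if_pos hs, ih (i+1) _ hd']
      simp [selPairs, hs]
    · rw [if_neg hs, ih (i+1) _ hd']
      simp [selPairs, hs]

lemma foldW_gen (ind : List Nat) (lets : List Char) :
    ∀ (a : List Nat) (b : List Char) (j : Nat) (l : List Char),
    ind.drop j = a → lets.drop j = b → a.length = b.length →
    (List.range' j a.length).foldl
      (fun (r : List Char) i => r.set (ind.getD i 0) (lets.getD i ' ')) l
    = applyW l (a.zip b) := by
  intro a
  induction a with
  | nil => intro b j l _ _ hlen; simp [applyW]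
  | cons q a' ih =>
    intro b j l hda hdb hlen
    cases b with
    | nil => simp at hlen
    | cons c b' =>
      have hq : ind.getD j 0 = q := by
        have h0 : (List.drop j ind)[0]? = ind[j]? := by
          simpa using (List.getElem?_drop (l := ind) (i := j) (j := 0))
        rw [hda] at h0
        simp [List.getD, ← h0]
      have hc : lets.getD j ' ' = c := by
        have h0 : (List.drop j lets)[0]? = lets[j]? := by
          simpa using (List.getElem?_drop (l := lets) (i := j) (j := 0))
        rw [hdb] at h0
        simp [List.getD, ← h0]
      have hda' : ind.drop (j+1) = a' := by
        have : ind.drop (j+1) = (ind.drop j).drop 1 := by rw [List.drop_drop]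
        rw [this, hda]; rfl
      have hdb' : lets.drop (j+1) = b' := by
        have : lets.drop (j+1) = (lets.drop j).drop 1 := by rw [List.drop_drop]
        rw [this, hdb]; rfl
      rw [List.length_cons, List.range'_succ, List.foldl_cons, hq, hc,
        ih b' (j+1) (l.set q c) hda' hdb' (by simpa using hlen)]
      simp [applyW]

lemma altLoop_some : ∀ (pending : List Char) (i : Nat) (res : List Char) (p : Nat) (f : Option Char),
    pvAltLoop res i pending (some p) f
    = (applyW res (chainWrites p (selPairs pending i)).1,
       some (chainWrites p (selPairs pending i)).2, f) := by
  intro pending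
  induction pending with
  | nil => intro i res p f; simp [pvAltLoop, selPairs, chainWrites, applyW]
  | cons c rest ih =>
    intro i res p f
    simp only [pvAltLoop, selPairs]
    by_cases hs : pvSel c
    · rw [if_pos hs, if_pos hs, ih (i+1)]
      simp [chainWrites, applyW]
    · rw [if_neg hs, if_neg hs]
      exact ih (i+1) res p f

lemma altLoop_none : ∀ (pending : List Char) (i : Nat) (res : List Char),
    pvAltLoop res i pending none none
    = (match selPairs pending i with
       | [] => (res, none, none)
       | (q, c) :: rest =>
         (applyW res (chainWrites q rest).1, some (chainWrites q rest).2, some c)) := by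
  intro pending
  induction pending with
  | nil => intro i res; simp [pvAltLoop, selPairs]
  | cons c rest ih =>
    intro i res
    simp only [pvAltLoop, selPairs]
    by_cases hs : pvSel c
    · simp only [if_pos hs]
      rw [altLoop_some]
    · simp only [if_neg hs]
      exact ih (i+1) res

-- A's zip of indices with the shifted letters IS B's chain of writes plus the closing write
lemma zip_shift_eq_chain : ∀ (rest : List (Nat × Char)) (q : Nat) (c : Char),
    (q :: rest.map Prod.fst).zip (rest.map Prod.snd ++ [c])
    = (chainWrites q rest).1 ++ [((chainWrites q rest).2, c)] := by
  intro rest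
  induction rest with
  | nil => intro q c; simp [chainWrites]
  | cons qc rest' ih =>
    intro q c
    obtain ⟨q', c'⟩ := qc
    simp only [List.map_cons, List.cons_append, List.zip_cons_cons, chainWrites]
    rw [ih q' c]

lemma set_self_of_getElem? (l : List Char) (q : Nat) (c : Char) (h : l[q]? = some c) :
    l.set q c = l := by
  have hq : q < l.length := by
    by_contra hq
    rw [List.getElem?_eq_none (by omega)] at h
    cases h
  apply List.ext_getElem?
  intro j
  rw [List.getElem?_set]
  by_cases h1 : q = j
  · subst h1; rw [if_pos rfl, if_pos hq]; exact h.symm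
  · rw [if_neg h1]

-- ===== VERDICT (by name: the statement is the Claim_ definition above) =====
theorem reverse_phase_2_spec : Claim_equal_reverse_phase_2 := by
  intro phrase _ _
  unfold Spec_reverse_phase_2 reverse_phase_2 reverse_phase_2_alt
  set l := phrase.toList with hl
  -- evaluate A's collection fold
  have hA := foldA_gen l l 0 ([], []) (by simp)
  rw [← List.range_eq_range'] at hA
  -- evaluate B's loop
  have hB := altLoop_none l 0 l
  simp only [hA, hB, List.nil_append]
  rcases hsp : selPairs l 0 with _ | ⟨⟨q, c⟩, rest⟩
  · -- no selected positions: both sides are the original list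
    simp
  · rcases rest with _ | ⟨⟨q', c'⟩, rest'⟩
    · -- exactly one selected position: A leaves l, B rewrites it with its own letter
      have hget : l[q]? = some c := by
        rcases selPairs_get l 0 q c (by rw [hsp]; simp) with ⟨j, hj, hg⟩
        simpa [hj] using hg
      simp [chainWrites, applyW, set_self_of_getElem? l q c hget]
    · -- at least two: A's indexed write-back equals B's chain of writes
      set sp := (q, c) :: (q', c') :: rest' with hspdef
      have hlen : (sp.map Prod.fst).length = (sp.map Prod.snd).length := by simp
      have hlen2 : ((sp.map Prod.snd).drop 1 ++ [(sp.map Prod.snd).getD 0 ' ']).length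
          = (sp.map Prod.fst).length := by simp [hspdef]
      have hW := foldW_gen (sp.map Prod.fst)
        ((sp.map Prod.snd).drop 1 ++ [(sp.map Prod.snd).getD 0 ' '])
        (sp.map Prod.fst) ((sp.map Prod.snd).drop 1 ++ [(sp.map Prod.snd).getD 0 ' '])
        0 l (by simp) (by simp) hlen2.symm
      rw [← List.range_eq_range'] at hW
      have hguard : 1 < (sp.map Prod.snd).length := by simp [hspdef]
      simp only [hsp, hguard, if_pos] at *
      rw [hW]
      have hz : (sp.map Prod.fst).zip ((sp.map Prod.snd).drop 1 ++ [(sp.map Prod.snd).getD 0 ' '])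
          = (chainWrites q ((q', c') :: rest')).1
            ++ [((chainWrites q ((q', c') :: rest')).2, c)] := by
        have := zip_shift_eq_chain ((q', c') :: rest') q c
        simpa [hspdef] using this
      rw [hz]
      simp [applyW, List.foldl_append, hspdef]
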